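-- pv_equiv track=rewrite | github.com/pamburus/hl | scripts/coverage-diff-analysis.py | ranges_to_string
-- ===== SOURCE A (Python) =====
-- from typing import Dict, List, Optional, Set, Tuple
--
-- def ranges_to_string(lines: Set[int]) -> str:
--     """Convert set of line numbers back to range string.
--
--     Args:
--         lines: Set of line numbers.
--
--     Returns:
--         Space-separated range string (e.g., "1-3 5 7-9").
--     """
--     if not lines:
--         return ""
--
--     sorted_lines = sorted(lines)
--     ranges: List[str] = []
--     start = sorted_lines[0]
--     end = start
--
--     for line in sorted_lines[1:]:
--         if line == end + 1:
--             end = line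
--         else:
--             if start == end:
--                 ranges.append(str(start))
--             else:
--                 ranges.append(f"{start}-{end}")
--             start = line
--             end = line
--
--     # Add the last range
--     if start == end:
--         ranges.append(str(start))
--     else:
--         ranges.append(f"{start}-{end}")
--
--     return " ".join(ranges)
-- ===== SOURCE B (Python) =====
-- def ranges_to_string(lines):
--     """Convert set of line numbers back to range string.
--
--     Boundary detection instead of a run-merging scan: an element x starts a
--     maximal run of consecutive integers iff x-1 is absent from the set, and
--     ends one iff x+1 is absent; the sorted starts and sorted ends pair up
--     positionally into the runs.
--     """
--     s = set(lines)
--     starts = sorted(x for x in s if x - 1 not in s)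
--     ends = sorted(x for x in s if x + 1 not in s)
--     return " ".join(
--         str(a) if a == b else f"{a}-{b}" for a, b in zip(starts, ends)
--     )
-- ===== Notes on version B (the rewrite author's own statement) =====
-- stated objective: alternative
-- what changed: A sorts and makes one run-merging scan with scalar start/end state; B never merges runs: it detects run boundaries by set membership (x is a start iff x-1 is absent, an end iff x+1 is absent), sorts the starts and ends separately and zips them into ranges.
import Mathlib
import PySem

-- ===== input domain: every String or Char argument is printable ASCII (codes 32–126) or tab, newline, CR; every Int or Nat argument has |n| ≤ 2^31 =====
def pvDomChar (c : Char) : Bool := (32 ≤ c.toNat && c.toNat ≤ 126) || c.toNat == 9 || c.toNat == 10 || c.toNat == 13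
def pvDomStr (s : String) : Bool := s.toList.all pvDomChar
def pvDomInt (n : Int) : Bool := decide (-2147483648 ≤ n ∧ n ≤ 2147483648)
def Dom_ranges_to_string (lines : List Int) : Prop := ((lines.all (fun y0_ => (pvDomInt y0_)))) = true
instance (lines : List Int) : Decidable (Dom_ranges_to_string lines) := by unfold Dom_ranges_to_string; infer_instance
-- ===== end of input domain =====

-- B replaces A's sorted run-merging scan by boundary detection: x starts a maximal run iff
-- x-1 is absent from the set and ends one iff x+1 is absent; the sorted starts and the
-- sorted ends are zipped into the ranges (objective: alternative algorithm, same cost).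

-- shared formatter: `str(start)` / f"{start}-{end}" (both Pythons format runs identically)
def pvFmt (a b : Int) : String :=
  if a = b then PySem.Int.toStr a else PySem.Int.toStr a ++ "-" ++ PySem.Int.toStr b

-- ===== PORT A =====
-- loop body of A: state (start, end, ranges)
def pvStepA (st : Int × Int × List String) (line : Int) : Int × Int × List String :=
  if line = st.2.1 + 1 then (st.1, line, st.2.2)
  else (line, line, st.2.2 ++ [pvFmt st.1 st.2.1])

def ranges_to_string (lines : List Int) : String :=
  if lines = [] then ""
  else
    let sorted_lines := PySem.List.sorted lines (fun x => x) false
    let start := PySem.List.pyGetD sorted_lines 0 0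
    let st := (PySem.List.slice sorted_lines (some 1) none).foldl pvStepA (start, start, [])
    PySem.Str.join " " (st.2.2 ++ [pvFmt st.1 st.2.1])

-- ===== PORT B =====
def ranges_to_string_alt (lines : List Int) : String :=
  let s := PySem.Set.ofList lines
  let starts := PySem.List.sorted (s.filter (fun x => !(PySem.Set.contains s (x - 1)))) (fun x => x) false
  let ends := PySem.List.sorted (s.filter (fun x => !(PySem.Set.contains s (x + 1)))) (fun x => x) false
  PySem.Str.join " " ((starts.zip ends).map (fun p => pvFmt p.1 p.2))

-- ===== PRECONDITION & SPEC =====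
-- The Python parameter is a set; its List representation holds distinct elements, so Pre_
-- only states that representation invariant (no actual Python input is excluded).
def Pre_ranges_to_string (lines : List Int) : Prop := lines.Nodup
instance (lines : List Int) : Decidable (Pre_ranges_to_string lines) := by unfold Pre_ranges_to_string; infer_instance
def pvWitness_ranges_to_string : List Int := [1, 2, 3, 5, 7, 8]

def Spec_ranges_to_string (lines : List Int) (out : String) : Prop := out = ranges_to_string_alt lines
instance (lines : List Int) (out : String) : Decidable (Spec_ranges_to_string lines out) := by unfold Spec_ranges_to_string; infer_instance

-- ===== CLAIM (what is proved, stated in full; the proofs are below) =====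
def Claim_equal_ranges_to_string : Prop := ∀ (lines : List Int), Dom_ranges_to_string lines → Pre_ranges_to_string lines → Spec_ranges_to_string lines (ranges_to_string lines)

-- ===== LEMMAS AND PROOFS =====

-- the common intermediate structure: the (start, end) chunks of the sorted list, head-first
def pvStep' (x : Int) (cs : List (Int × Int)) : List (Int × Int) :=
  match cs with
  | (a, b) :: rest => if a = x + 1 then (x, b) :: rest else (x, x) :: (a, b) :: rest
  | [] => [(x, x)]

-- A's fold only appends to the string accumulator
lemma pvFoldA_append (t : List Int) (s e : Int) (rs : List String) :
    t.foldl pvStepA (s, e, rs) =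
      ((t.foldl pvStepA (s, e, [])).1, (t.foldl pvStepA (s, e, [])).2.1,
        rs ++ (t.foldl pvStepA (s, e, [])).2.2) := by
  induction t generalizing s e rs with
  | nil => simp
  | cons y ys ih =>
    simp only [List.foldl_cons, pvStepA]
    split_ifs
    · exact ih s y rs
    · simp only [List.nil_append]
      rw [ih y y (rs ++ [pvFmt s e]), ih y y [pvFmt s e]]
      simp

-- merging the in-progress run (s, e) with the already-chunked tail
def pvMerge (s e : Int) (cs : List (Int × Int)) : List (Int × Int) :=
  match cs with
  | (a, b) :: rest => if a = e + 1 then (s, b) :: rest else (s, e) :: (a, b) :: rest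
  | [] => [(s, e)]

lemma pvMerge_self (x : Int) (cs : List (Int × Int)) : pvMerge x x cs = pvStep' x cs := by
  cases cs with
  | nil => rfl
  | cons p rest => obtain ⟨a, b⟩ := p; rfl

-- A's scan over t starting in run (s, e) produces exactly the formatted merged chunks
lemma pvFoldA_chunks (t : List Int) (s e : Int) :
    (t.foldl pvStepA (s, e, [])).2.2 ++
        [pvFmt (t.foldl pvStepA (s, e, [])).1 (t.foldl pvStepA (s, e, [])).2.1] =
      (pvMerge s e (t.foldr pvStep' [])).map (fun p => pvFmt p.1 p.2) := by
  induction t generalizing s e with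
  | nil => simp [pvMerge]
  | cons y ys ih =>
    simp only [List.foldl_cons, List.foldr_cons, pvStepA]
    split_ifs with hy
    · subst hy
      rw [ih s (e + 1)]
      cases hc : ys.foldr pvStep' [] with
      | nil => simp [pvStep', pvMerge]
      | cons p rest =>
        obtain ⟨a, b⟩ := p
        by_cases ha : a = e + 1 + 1 <;> simp [pvStep', pvMerge, ha]
    · simp only [List.nil_append]
      rw [pvFoldA_append ys y y [pvFmt s e]]
      simp only [List.cons_append, List.nil_append]
      rw [ih y y, pvMerge_self]
      cases hc : ys.foldr pvStep' [] with
      | nil => simp [pvStep', pvMerge, hy]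
      | cons p rest =>
        obtain ⟨a, b⟩ := p
        by_cases ha : a = y + 1 <;> simp [pvStep', pvMerge, hy, ha]

-- pvStep' always puts x at the head
lemma pvStep'_head (x : Int) (cs : List (Int × Int)) :
    ∃ b rest, pvStep' x cs = (x, b) :: rest := by
  cases cs with
  | nil => exact ⟨x, [], rfl⟩
  | cons p rest =>
    obtain ⟨a, b⟩ := p
    by_cases h : a = x + 1
    · exact ⟨b, rest, by simp [pvStep', h]⟩
    · exact ⟨x, (a, b) :: rest, by simp [pvStep', h]⟩

-- the chunk starts are exactly the elements whose predecessor is absent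
lemma map_fst_chunks (l : List Int) (hl : l.Pairwise (· < ·)) :
    (l.foldr pvStep' []).map Prod.fst = l.filter (fun y => !(decide ((y - 1) ∈ l))) := by
  induction l with
  | nil => simp
  | cons x t ih =>
    rw [List.pairwise_cons] at hl
    obtain ⟨hx, ht⟩ := hl
    have hx1 : (decide ((x - 1) ∈ (x :: t)) : Bool) = false := by
      simp only [decide_eq_false_iff_not, List.mem_cons]
      rintro (h | h)
      · omega
      · exact absurd (hx _ h) (by omega)
    cases t with
    | nil =>
      simp only [List.foldr_cons, List.foldr_nil, pvStep', List.map_cons, List.map_nil]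
      rw [List.filter_cons_of_pos (by rw [hx1]; rfl)]
      rfl
    | cons y t' =>
      rw [List.pairwise_cons] at ht
      obtain ⟨hy, ht'⟩ := ht
      have hxy : x < y := hx y (by simp)
      obtain ⟨b, rest, hc⟩ := pvStep'_head y (t'.foldr pvStep' [])
      have ihc := ih (List.pairwise_cons.mpr ⟨hy, ht'⟩)
      simp only [List.foldr_cons] at ihc ⊢
      rw [hc] at ihc ⊢
      have hyfilter : (decide ((y - 1) ∈ (y :: t')) : Bool) = false := by
        simp only [decide_eq_false_iff_not, List.mem_cons]
        rintro (h | h)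
        · omega
        · exact absurd (hy _ h) (by omega)
      rw [List.filter_cons_of_pos (by rw [hyfilter]; rfl), List.map_cons] at ihc
      have hrest : rest.map Prod.fst = t'.filter (fun z => !(decide ((z - 1) ∈ (y :: t')))) :=
        (List.cons.injEq _ _ _ _).mp ihc |>.2
      by_cases hcons : y = x + 1
      · have hstep : pvStep' x ((y, b) :: rest) = (x, b) :: rest := by
          simp [pvStep', hcons]
        have hyl : (decide ((y - 1) ∈ (x :: y :: t')) : Bool) = true := by
          simp only [decide_eq_true_eq, List.mem_cons]; left; omega
        have hfc : t'.filter (fun z => !(decide ((z - 1) ∈ (x :: y :: t')))) =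
            t'.filter (fun z => !(decide ((z - 1) ∈ (y :: t')))) := by
          apply List.filter_congr
          intro z hz
          have hyz : y < z := hy z hz
          simp only [List.mem_cons]
          have : ¬ (z - 1 = x) := by omega
          simp [this]
        rw [hstep, List.map_cons, hrest,
          List.filter_cons_of_pos (by rw [hx1]; rfl),
          List.filter_cons_of_neg (by rw [hyl]; decide), hfc]
      · have hstep : pvStep' x ((y, b) :: rest) = (x, x) :: (y, b) :: rest := by
          simp [pvStep', hcons]
        have hfc : (y :: t').filter (fun z => !(decide ((z - 1) ∈ (x :: y :: t')))) =
            (y :: t').filter (fun z => !(decide ((z - 1) ∈ (y :: t')))) := by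
          apply List.filter_congr
          intro z hz
          have hyz : y ≤ z := by
            rcases List.mem_cons.mp hz with h | h
            · omega
            · exact le_of_lt (hy z h)
          simp only [List.mem_cons]
          have : ¬ (z - 1 = x) := by omega
          simp [this]
        rw [hstep]
        simp only [List.map_cons]
        rw [hrest,
          List.filter_cons_of_pos (by rw [hx1]; rfl), hfc,
          List.filter_cons_of_pos (by rw [hyfilter]; rfl)]

-- the chunk ends are exactly the elements whose successor is absent
lemma map_snd_chunks (l : List Int) (hl : l.Pairwise (· < ·)) :
    (l.foldr pvStep' []).map Prod.snd = l.filter (fun y => !(decide ((y + 1) ∈ l))) := by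
  induction l with
  | nil => simp
  | cons x t ih =>
    rw [List.pairwise_cons] at hl
    obtain ⟨hx, ht⟩ := hl
    cases t with
    | nil =>
      simp only [List.foldr_cons, List.foldr_nil, pvStep', List.map_cons, List.map_nil]
      rw [List.filter_cons_of_pos (by simp)]
      rfl
    | cons y t' =>
      rw [List.pairwise_cons] at ht
      obtain ⟨hy, ht'⟩ := ht
      have hxy : x < y := hx y (by simp)
      obtain ⟨b, rest, hc⟩ := pvStep'_head y (t'.foldr pvStep' [])
      have ihc := ih (List.pairwise_cons.mpr ⟨hy, ht'⟩)
      simp only [List.foldr_cons] at ihc ⊢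
      rw [hc] at ihc ⊢
      by_cases hcons : y = x + 1
      · have hstep : pvStep' x ((y, b) :: rest) = (x, b) :: rest := by
          simp [pvStep', hcons]
        have hxl : (decide ((x + 1) ∈ (x :: y :: t')) : Bool) = true := by
          simp only [decide_eq_true_eq, List.mem_cons]; right; left; omega
        have hfc : (y :: t').filter (fun z => !(decide ((z + 1) ∈ (x :: y :: t')))) =
            (y :: t').filter (fun z => !(decide ((z + 1) ∈ (y :: t')))) := by
          apply List.filter_congr
          intro z hz
          have hyz : y ≤ z := by
            rcases List.mem_cons.mp hz with h | h
            · omega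
            · exact le_of_lt (hy z h)
          simp only [List.mem_cons]
          have : ¬ (z + 1 = x) := by omega
          simp [this]
        have hmsnd : ((x, b) :: rest).map Prod.snd = ((y, b) :: rest).map Prod.snd := by
          simp
        have hrhs : (x :: y :: t').filter (fun z => !(decide ((z + 1) ∈ (x :: y :: t')))) =
            (y :: t').filter (fun z => !(decide ((z + 1) ∈ (y :: t')))) := by
          rw [List.filter_cons_of_neg (by rw [hxl]; decide), hfc]
        rw [hstep, hmsnd, ihc]
        exact hrhs.symm
      · have hstep : pvStep' x ((y, b) :: rest) = (x, x) :: (y, b) :: rest := by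
          simp [pvStep', hcons]
        have hxl : (decide ((x + 1) ∈ (x :: y :: t')) : Bool) = false := by
          simp only [decide_eq_false_iff_not, List.mem_cons]
          rintro (h | h | h)
          · omega
          · omega
          · exact absurd (hy _ h) (by have := hx _ (List.mem_cons_of_mem _ h); omega)
        have hfc : (y :: t').filter (fun z => !(decide ((z + 1) ∈ (x :: y :: t')))) =
            (y :: t').filter (fun z => !(decide ((z + 1) ∈ (y :: t')))) := by
          apply List.filter_congr
          intro z hz
          have hyz : y ≤ z := by
            rcases List.mem_cons.mp hz with h | h
            · omega
            · exact le_of_lt (hy z h)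
          simp only [List.mem_cons]
          have : ¬ (z + 1 = x) := by omega
          simp [this]
        have hrhs : (x :: y :: t').filter (fun z => !(decide ((z + 1) ∈ (x :: y :: t')))) =
            x :: (y :: t').filter (fun z => !(decide ((z + 1) ∈ (y :: t')))) := by
          rw [List.filter_cons_of_pos (by rw [hxl]; rfl), hfc]
        rw [hstep, List.map_cons, ihc]
        exact hrhs.symm

-- ===== VERDICT (by name: the statement is the Claim_ definition above) =====
-- B's two sorted filters over the set are the corresponding filters of the sorted list
lemma pvSortedFilter (lines : List Int) (hnd : lines.Nodup) (f : Int → Int) :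
    PySem.List.sorted (lines.filter (fun x => !(PySem.Set.contains lines (f x))))
        (fun x => x) false =
      (PySem.List.sorted lines (fun x => x) false).filter
        (fun y => !(decide (f y ∈ PySem.List.sorted lines (fun x => x) false))) := by
  have hperm : (PySem.List.sorted lines (fun x => x) false).Perm lines :=
    PySem.List.sorted_perm lines (fun x => x) false
  have hL : (PySem.List.sorted lines (fun x => x) false).Pairwise (· < ·) :=
    ((PySem.List.sorted_pairwise lines (fun x => x)).and (hperm.nodup_iff.mpr hnd)).imp
      (fun h => lt_of_le_of_ne h.1 h.2)
  apply PySem.List.sorted_eq_of_perm_of_pairwise_lt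
  · have hcongr : (PySem.List.sorted lines (fun x => x) false).filter
        (fun y => !(decide (f y ∈ PySem.List.sorted lines (fun x => x) false))) =
        (PySem.List.sorted lines (fun x => x) false).filter
          (fun y => !(PySem.Set.contains lines (f y))) := by
      apply List.filter_congr
      intro z _
      have : (f z ∈ PySem.List.sorted lines (fun x => x) false) ↔ (f z ∈ lines) :=
        hperm.mem_iff
      simp [this]
    rw [hcongr]
    exact hperm.filter _
  · exact hL.filter _

theorem ranges_to_string_spec : Claim_equal_ranges_to_string := by
  intro lines _ hnd
  show ranges_to_string lines = ranges_to_string_alt lines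
  by_cases hnil : lines = []
  · subst hnil; rfl
  · have hperm : (PySem.List.sorted lines (fun x => x) false).Perm lines :=
      PySem.List.sorted_perm lines (fun x => x) false
    have hL : (PySem.List.sorted lines (fun x => x) false).Pairwise (· < ·) :=
      ((PySem.List.sorted_pairwise lines (fun x => x)).and (hperm.nodup_iff.mpr hnd)).imp
        (fun h => lt_of_le_of_ne h.1 h.2)
    have hset : PySem.Set.ofList lines = lines := PySem.Set.ofList_eq_self_of_nodup lines hnd
    have hm1 : PySem.List.sorted (lines.filter (fun x => !(PySem.Set.contains lines (x - 1))))
          (fun x => x) false =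
        (PySem.List.sorted lines (fun x => x) false).filter
          (fun y => !(decide ((y - 1) ∈ PySem.List.sorted lines (fun x => x) false))) := by
      simpa using pvSortedFilter lines hnd (fun x => x - 1)
    have hp1 : PySem.List.sorted (lines.filter (fun x => !(PySem.Set.contains lines (x + 1))))
          (fun x => x) false =
        (PySem.List.sorted lines (fun x => x) false).filter
          (fun y => !(decide ((y + 1) ∈ PySem.List.sorted lines (fun x => x) false))) := by
      simpa using pvSortedFilter lines hnd (fun x => x + 1)
    have hB : ranges_to_string_alt lines =
        PySem.Str.join " "
          (((PySem.List.sorted lines (fun x => x) false).foldr pvStep' []).map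
            (fun p => pvFmt p.1 p.2)) := by
      unfold ranges_to_string_alt
      rw [hset]
      simp only [hm1, hp1, ← map_fst_chunks _ hL, ← map_snd_chunks _ hL, List.zip_map']
      simp
    rw [hB]
    unfold ranges_to_string
    rw [if_neg hnil]
    cases hs : PySem.List.sorted lines (fun x => x) false with
    | nil => exact absurd ((PySem.List.sorted_eq_nil_iff lines (fun x => x) false).mp hs) hnil
    | cons h t =>
      simp only [PySem.List.pyGetD_zero_cons, PySem.List.slice_from_one, List.tail_cons]
      rw [pvFoldA_chunks t h h, pvMerge_self]
      rfl
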